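-- pv_equiv track=rewrite | github.com/jasmaabox/icpfc2024 | encoding.py | decode_integer
-- ===== SOURCE A (Python) =====
-- def decode_integer(encoded_text: str) -> int:
--     if len(encoded_text) > 0 and encoded_text[0] == "I":
--         digits = [ord(c) - ord("!") for c in encoded_text[1:]]
--         acc = 0
--         m = 1
--         for d in digits[::-1]:
--             acc += m * d
--             m *= 94
--         return acc
--     else:
--         raise Exception("not a valid integer")
-- ===== SOURCE B (Python) =====
-- def decode_integer(encoded_text: str) -> int:
--     if len(encoded_text) > 0 and encoded_text[0] == "I":
--         acc = 0
--         for c in encoded_text[1:]: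
--             acc = acc * 94 + (ord(c) - ord("!"))
--         return acc
--     raise Exception("not a valid integer")
-- ===== Notes on version B (the rewrite author's own statement) =====
-- stated objective: simpler
-- what changed: Replaced the reversed digit list with running power-of-94 multiplier by a single left-to-right Horner pass (acc = acc*94 + digit), no list, no reversal, no separate power variable.
import Mathlib
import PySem

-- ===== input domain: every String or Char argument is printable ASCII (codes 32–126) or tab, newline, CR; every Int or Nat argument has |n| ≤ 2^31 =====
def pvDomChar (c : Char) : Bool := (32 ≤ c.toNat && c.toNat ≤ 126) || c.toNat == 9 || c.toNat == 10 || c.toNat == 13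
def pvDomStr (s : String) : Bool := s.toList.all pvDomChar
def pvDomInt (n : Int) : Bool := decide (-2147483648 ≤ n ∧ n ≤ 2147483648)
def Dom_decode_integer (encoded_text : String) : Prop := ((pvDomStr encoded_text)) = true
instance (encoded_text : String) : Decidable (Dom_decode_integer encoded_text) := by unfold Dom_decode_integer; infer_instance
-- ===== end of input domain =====

-- B replaces A's reversed digit list + running multiplier by a left-to-right Horner pass (simpler, same cost).
-- Both Pythons raise on inputs not starting with 'I'; those are excluded by Pre_.

-- ===== PORT A =====
-- digits = [ord(c) - ord('!') for c in s[1:]]; acc,m loop over digits[::-1]; value only inside the guard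
def decode_integer (encoded_text : String) : Int :=
  if encoded_text.toList.head? = some 'I' then
    let digits : List Int := (encoded_text.toList.drop 1).map (fun c => (c.toNat : Int) - 33)
    (digits.reverse.foldl (fun (p : Int × Int) d => (p.1 + p.2 * d, p.2 * 94)) (0, 1)).1
  else 0  -- Python raises here; excluded by Pre_decode_integer

-- ===== PORT B =====
def decode_integer_alt (encoded_text : String) : Int :=
  if encoded_text.toList.head? = some 'I' then
    (encoded_text.toList.drop 1).foldl (fun acc c => acc * 94 + ((c.toNat : Int) - 33)) 0
  else 0  -- Python raises here; excluded by Pre_decode_integer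

-- ===== PRECONDITION & SPEC =====
-- A (and B) raise Exception unless the string is nonempty and starts with 'I'.
def Pre_decode_integer (encoded_text : String) : Prop := encoded_text.toList.head? = some 'I'
instance (encoded_text : String) : Decidable (Pre_decode_integer encoded_text) := by unfold Pre_decode_integer; infer_instance
def pvWitness_decode_integer : String := "I\"!"
def Spec_decode_integer (encoded_text : String) (out : Int) : Prop := out = decode_integer_alt encoded_text
instance (encoded_text : String) (out : Int) : Decidable (Spec_decode_integer encoded_text out) := by unfold Spec_decode_integer; infer_instance

-- ===== CLAIM (what is proved, stated in full; the proofs are below) =====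
def Claim_equal_decode_integer : Prop := ∀ (encoded_text : String), Dom_decode_integer encoded_text → Pre_decode_integer encoded_text → Spec_decode_integer encoded_text (decode_integer encoded_text)

-- ===== LEMMAS AND PROOFS =====

-- A's loop: after folding over a list l with state (a, m), the first component is a + m * (base-94 value of l read little-endian).
theorem pvFoldA (l : List Int) (a m : Int) :
    (l.foldl (fun (p : Int × Int) d => (p.1 + p.2 * d, p.2 * 94)) (a, m)).1
      = a + m * l.foldr (fun d acc => d + 94 * acc) 0 := by
  induction l generalizing a m with
  | nil => simp
  | cons d t ih => simp [List.foldl, ih]; ring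

theorem pvFoldEq (l : List Int) :
    (l.reverse.foldl (fun (p : Int × Int) d => (p.1 + p.2 * d, p.2 * 94)) (0, 1)).1
      = l.foldl (fun acc d => acc * 94 + d) 0 := by
  rw [pvFoldA, ← List.foldl_reverse, List.reverse_reverse]
  have : (fun acc d : Int => acc * 94 + d) = fun acc d => d + 94 * acc := by
    funext a d; ring
  rw [this]; ring

theorem pvHornerMap (l : List Char) :
    (l.map (fun c => (c.toNat : Int) - 33)).foldl (fun acc d => acc * 94 + d) 0
      = l.foldl (fun acc c => acc * 94 + ((c.toNat : Int) - 33)) 0 := by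
  rw [List.foldl_map]

-- ===== VERDICT (by name: the statement is the Claim_ definition above) =====
theorem decode_integer_spec : Claim_equal_decode_integer := by
  intro s _ hpre
  unfold Spec_decode_integer decode_integer decode_integer_alt
  unfold Pre_decode_integer at hpre
  rw [if_pos hpre, if_pos hpre]
  simpa using (pvFoldEq ((s.toList.drop 1).map (fun c => (c.toNat : Int) - 33))).trans
    (pvHornerMap (s.toList.drop 1))
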